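-- pv_equiv track=rewrite | github.com/stayt1/result | RankGuess-Code/Targeted/utils.py | email_transform
-- ===== SOURCE A (Python) =====
-- from enum import Enum
--
-- class TokenType(Enum):
--     DIGIT = 1
--     LETTER = 2
--     OTHER = 3
--
-- def get_type(c):
--     if c.isdigit():
--         return TokenType.DIGIT
--     if c.isalpha():
--         return TokenType.LETTER
--     return TokenType.OTHER
--
-- def email_transform(email):
--     returns = []
--     email_start = 3000
--     email_letter_start = 3100
--     email_digit_start = 3200
--     at_pos = email.find('@')
--     if at_pos == -1:
--         return returns
--     returns.append((email, email_start))
--     returns.append((email[0:at_pos], email_start + 1))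
--     email_start += 2
--
--     last_type = get_type(email[0])
--     last_pos = 0
--     for i in range(1, at_pos):
--         current_type = get_type(email[i])
--         if last_type != current_type:
--             returns.append((email[last_pos:i], email_start))
--             email_start += 1
--             if last_type == TokenType.DIGIT:
--                 returns.append((email[last_pos:i], email_digit_start))
--                 email_digit_start += 1
--             elif last_type == TokenType.LETTER:
--                 returns.append((email[last_pos:i], email_letter_start))
--                 email_letter_start += 1
--             last_pos = i
--             last_type = current_type
--
--     if last_pos != 0:
--         returns.append((email[last_pos:at_pos], email_start))
--         if last_type == TokenType.DIGIT:
--             returns.append((email[last_pos:at_pos], email_digit_start))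
--             email_digit_start += 1
--         elif last_type == TokenType.LETTER:
--             returns.append((email[last_pos:at_pos], email_letter_start))
--             email_letter_start += 1
--
--     period_pos = email[at_pos + 1:].find('.')
--     if period_pos != -1:
--         returns.append((email[at_pos + 1:at_pos + 1 + period_pos], 3300))
--     return returns
-- ===== SOURCE B (Python) =====
-- from enum import Enum
-- from itertools import groupby
--
-- class TokenType(Enum):
--     DIGIT = 1
--     LETTER = 2
--     OTHER = 3
--
-- def get_type(c):
--     if c.isdigit():
--         return TokenType.DIGIT
--     if c.isalpha():
--         return TokenType.LETTER
--     return TokenType.OTHER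
--
-- def email_transform(email):
--     at_pos = email.find('@')
--     if at_pos == -1:
--         return []
--     local = email[:at_pos]
--     out = [(email, 3000), (local, 3001)]
--     runs = [(''.join(g), t) for t, g in groupby(local, key=get_type)]
--     if len(runs) >= 2:
--         code, lcode, dcode = 3002, 3100, 3200
--         for run, t in runs:
--             out.append((run, code))
--             code += 1
--             if t is TokenType.DIGIT:
--                 out.append((run, dcode))
--                 dcode += 1
--             elif t is TokenType.LETTER:
--                 out.append((run, lcode))
--                 lcode += 1
--     domain = email[at_pos + 1:]
--     period_pos = domain.find('.')
--     if period_pos != -1: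
--         out.append((domain[:period_pos], 3300))
--     return out
-- ===== Notes on version B (the rewrite author's own statement) =====
-- stated objective: alternative
-- what changed: A's single index loop that tracks last_pos/last_type and emits on each type change (plus a special tail block) is replaced by a two-phase decomposition: itertools.groupby splits the local part into same-type runs first, then one pass over the runs list (guarded by len(runs) >= 2) assigns the sequential 3002+/3100+/3200+ codes.
import Mathlib
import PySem

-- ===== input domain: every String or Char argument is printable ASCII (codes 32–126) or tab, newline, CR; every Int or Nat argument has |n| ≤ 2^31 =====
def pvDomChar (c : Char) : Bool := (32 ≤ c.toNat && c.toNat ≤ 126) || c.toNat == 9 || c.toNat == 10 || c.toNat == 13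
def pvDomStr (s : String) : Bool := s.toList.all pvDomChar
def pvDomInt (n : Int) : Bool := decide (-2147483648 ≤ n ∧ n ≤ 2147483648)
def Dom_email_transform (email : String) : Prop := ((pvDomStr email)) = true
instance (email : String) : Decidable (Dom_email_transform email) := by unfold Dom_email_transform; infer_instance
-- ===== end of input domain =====

-- B re-decomposes A's index loop: it splits the local part into same-type runs first (one groupby pass)
-- and then emits the ranked tokens per run; same return value, different decomposition (objective: alternative).

-- ===== PORT A =====
inductive TType | digit | letter | other
deriving DecidableEq, Repr

def get_type (c : Char) : TType :=
  if PySem.Chars.isdigit c then TType.digit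
  else if PySem.Chars.isalpha c then TType.letter
  else TType.other

-- the body of A's `for i in range(1, at_pos)` loop; state = (returns, email_start, email_letter_start, email_digit_start, last_type, last_pos)
def pyStepA (cs : List Char) (st : List (String × Int) × Int × Int × Int × TType × Int) (i : Int) :
    List (String × Int) × Int × Int × Int × TType × Int :=
  let (ret, es, ls, ds, lastT, lastPos) := st
  let ct := get_type ((PySem.List.pyGet? cs i).getD ' ')   -- index always in range in A's loop
  if lastT ≠ ct then
    let seg := String.ofList (PySem.List.slice cs (some lastPos) (some i))
    if lastT = TType.digit then (ret ++ [(seg, es), (seg, ds)], es + 1, ls, ds + 1, ct, i)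
    else if lastT = TType.letter then (ret ++ [(seg, es), (seg, ls)], es + 1, ls + 1, ds, ct, i)
    else (ret ++ [(seg, es)], es + 1, ls, ds, ct, i)
  else st

def email_transform (email : String) : List (String × Int) :=
  let cs := email.toList
  let at_pos := PySem.Chars.find cs ['@']
  if at_pos = -1 then []
  else
    let returns : List (String × Int) :=
      [(email, 3000), (String.ofList (PySem.List.slice cs (some 0) (some at_pos)), 3001)]
    let st := (PySem.List.pyRange 1 at_pos 1).foldl (pyStepA cs)
      (returns, 3002, 3100, 3200, get_type ((PySem.List.pyGet? cs 0).getD ' '), 0)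
    let ret1 :=
      if st.2.2.2.2.2 ≠ 0 then
        let seg := String.ofList (PySem.List.slice cs (some st.2.2.2.2.2) (some at_pos))
        if st.2.2.2.2.1 = TType.digit then st.1 ++ [(seg, st.2.1), (seg, st.2.2.2.1)]
        else if st.2.2.2.2.1 = TType.letter then st.1 ++ [(seg, st.2.1), (seg, st.2.2.1)]
        else st.1 ++ [(seg, st.2.1)]
      else st.1
    let domain := PySem.List.slice cs (some (at_pos + 1)) none
    let period_pos := PySem.Chars.find domain ['.']
    if period_pos = -1 then ret1
    else ret1 ++ [(String.ofList (PySem.List.slice cs (some (at_pos + 1)) (some (at_pos + 1 + period_pos))), 3300)]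

-- ===== PORT B =====
-- itertools.groupby(local, key=get_type): consecutive same-type runs with their type
def runsOf (l : List Char) : List (List Char × TType) :=
  match l with
  | [] => []
  | c :: rest =>
    let t := get_type c
    (c :: rest.takeWhile (fun d => decide (get_type d = t)), t)
      :: runsOf (rest.dropWhile (fun d => decide (get_type d = t)))
termination_by l.length
decreasing_by
  simpa using Nat.lt_succ_of_le (List.length_dropWhile_le _ _)

-- the body of B's `for run, t in runs` loop; state = (out, code, lcode, dcode)
def emitStep (st : List (String × Int) × Int × Int × Int) (rt : List Char × TType) :
    List (String × Int) × Int × Int × Int :=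
  let out := st.1 ++ [(String.ofList rt.1, st.2.1)]
  if rt.2 = TType.digit then (out ++ [(String.ofList rt.1, st.2.2.2)], st.2.1 + 1, st.2.2.1, st.2.2.2 + 1)
  else if rt.2 = TType.letter then (out ++ [(String.ofList rt.1, st.2.2.1)], st.2.1 + 1, st.2.2.1 + 1, st.2.2.2)
  else (out, st.2.1 + 1, st.2.2.1, st.2.2.2)

def email_transform_alt (email : String) : List (String × Int) :=
  let cs := email.toList
  let at_pos := PySem.Chars.find cs ['@']
  if at_pos = -1 then []
  else
    let localCs := PySem.List.slice cs none (some at_pos)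
    let out0 : List (String × Int) := [(email, 3000), (String.ofList localCs, 3001)]
    let runs := runsOf localCs
    let out1 := if 2 ≤ runs.length then (runs.foldl emitStep (out0, 3002, 3100, 3200)).1 else out0
    let domain := PySem.List.slice cs (some (at_pos + 1)) none
    let period_pos := PySem.Chars.find domain ['.']
    if period_pos = -1 then out1
    else out1 ++ [(String.ofList (PySem.List.slice domain none (some period_pos)), 3300)]

-- ===== PRECONDITION & SPEC =====
def Spec_email_transform (email : String) (out : List (String × Int)) : Prop := out = email_transform_alt email
instance (email : String) (out : List (String × Int)) : Decidable (Spec_email_transform email out) := by unfold Spec_email_transform; infer_instance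

-- ===== CLAIM (what is proved, stated in full; the proofs are below) =====
def Claim_equal_email_transform : Prop := ∀ (email : String), Dom_email_transform email → Spec_email_transform email (email_transform email)

-- ===== LEMMAS AND PROOFS =====

-- the token block B emits for a runs list, given the three starting counters
def E : List (List Char × TType) → Int → Int → Int → List (String × Int)
  | [], _, _, _ => []
  | (r, t) :: rs, c, l, d =>
    ((String.ofList r, c) ::
      (if t = TType.digit then [(String.ofList r, d)]
       else if t = TType.letter then [(String.ofList r, l)] else [])) ++
    E rs (c + 1) (if t = TType.letter then l + 1 else l) (if t = TType.digit then d + 1 else d)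

def nLet (rs : List (List Char × TType)) : Nat := rs.countP (fun x => decide (x.2 = TType.letter))
def nDig (rs : List (List Char × TType)) : Nat := rs.countP (fun x => decide (x.2 = TType.digit))

theorem runsOf_uniform (t : TType) (r : List Char) (hr : r ≠ [])
    (hall : ∀ c ∈ r, get_type c = t) : runsOf r = [(r, t)] := by
  match r with
  | [] => exact absurd rfl hr
  | c :: rest =>
    have hc : get_type c = t := hall c (by simp)
    rw [runsOf]
    have h1 : rest.takeWhile (fun d => decide (get_type d = t)) = rest :=
      List.takeWhile_eq_self_iff.mpr (by intro a ha; simp [hall a (by simp [ha])])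
    have h2 : rest.dropWhile (fun d => decide (get_type d = t)) = [] :=
      List.dropWhile_eq_nil_iff.mpr (by intro a ha; simp [hall a (by simp [ha])])
    simp only [hc, h1, h2]
    simp [runsOf]

theorem runsOf_append_last (t : TType) (l r : List Char) (hr : r ≠ [])
    (hall : ∀ c ∈ r, get_type c = t)
    (hb : ∀ c, l.getLast? = some c → get_type c ≠ t) :
    runsOf (l ++ r) = runsOf l ++ [(r, t)] := by
  induction l using runsOf.induct with
  | case1 =>
    simp only [List.nil_append]
    rw [runsOf_uniform t r hr hall]; simp [runsOf]
  | case2 c rest tt ih =>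
    show runsOf (c :: (rest ++ r)) = _
    rw [runsOf, runsOf]
    by_cases hall' : ∀ a ∈ rest, get_type a = get_type c
    · -- the run of c extends to the end of l
      have hlast : get_type c ≠ t := by
        rcases List.eq_nil_or_concat rest with h0 | ⟨pre, a, h0⟩
        · exact hb c (by simp [h0])
        · have := hb a (by rw [show c :: rest = (c :: pre) ++ [a] by simp [h0]]; exact List.getLast?_concat)
          rwa [hall' a (by simp [h0])] at this
      obtain ⟨d, r', rfl⟩ := List.exists_cons_of_ne_nil hr
      have hd : ¬ (get_type d = get_type c) := by
        rw [hall d (by simp)]; exact fun h => hlast h.symm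
      have htw : rest.takeWhile (fun d => decide (get_type d = get_type c)) = rest :=
        List.takeWhile_eq_self_iff.mpr (by intro a ha; simpa using hall' a ha)
      have hdw : rest.dropWhile (fun d => decide (get_type d = get_type c)) = [] :=
        List.dropWhile_eq_nil_iff.mpr (by intro a ha; simpa using hall' a ha)
      rw [List.takeWhile_append, List.dropWhile_append, htw, hdw]
      simp only [List.isEmpty_nil, if_true]
      rw [List.takeWhile_cons_of_neg (by simpa using hd), List.dropWhile_cons_of_neg (by simpa using hd)]
      rw [runsOf_uniform t (d :: r') (by simp) hall]
      simp [runsOf]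
    · -- the run of c ends inside l
      have hrest : rest ≠ [] := by rintro rfl; exact hall' (by simp)
      have htw : (rest.takeWhile (fun d => decide (get_type d = get_type c))).length ≠ rest.length := by
        intro hlen
        exact hall' (by
          have := (List.takeWhile_prefix (l := rest) (p := fun d => decide (get_type d = get_type c))).eq_of_length hlen
          intro a ha
          simpa using List.takeWhile_eq_self_iff.mp this a ha)
      have hdw : rest.dropWhile (fun d => decide (get_type d = get_type c)) ≠ [] := by
        intro h0
        exact hall' (by intro a ha; simpa using List.dropWhile_eq_nil_iff.mp h0 a ha)
      rw [List.takeWhile_append, List.dropWhile_append, if_neg htw,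
        if_neg (by simpa [List.isEmpty_iff] using hdw)]
      rw [ih (by
        intro a ha hat
        refine hb a ?_ hat
        have hsuf := List.dropWhile_suffix (l := rest) (fun d => decide (get_type d = get_type c))
        obtain ⟨pre, hpre⟩ := hsuf
        rw [show c :: rest = [c] ++ rest by rfl, List.getLast?_append_of_ne_nil [c] hrest,
          ← hpre, List.getLast?_append_of_ne_nil pre hdw]
        exact ha)]
      rfl

theorem E_append (rs rs' : List (List Char × TType)) (c l d : Int) :
    E (rs ++ rs') c l d = E rs c l d ++ E rs' (c + rs.length) (l + nLet rs) (d + nDig rs) := by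
  induction rs generalizing c l d with
  | nil => simp [E, nLet, nDig]
  | cons x rs ih =>
    obtain ⟨r, t⟩ := x
    simp only [List.cons_append, E, ih, nLet, nDig, List.countP_cons, List.length_cons]
    rcases t with _ | _ | _ <;> simp <;> ring_nf

theorem foldl_emitStep (rs : List (List Char × TType)) (out : List (String × Int)) (c l d : Int) :
    rs.foldl emitStep (out, c, l, d)
      = (out ++ E rs c l d, c + rs.length, l + nLet rs, d + nDig rs) := by
  induction rs generalizing out c l d with
  | nil => simp [E, nLet, nDig]
  | cons x rs ih =>
    obtain ⟨r, t⟩ := x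
    rcases t with _ | _ | _ <;>
      simp [List.foldl_cons, emitStep, ih, E, nLet, nDig] <;> ring_nf <;> simp

theorem loop_inv (cs : List Char) (init : List (String × Int)) (n : Nat) (hn : n ≤ cs.length)
    (m : Nat) (h1 : 1 ≤ m) :
    m ≤ n →
    ∃ p t, p < m ∧
      ((cs.take m).drop p ≠ []) ∧
      (∀ c ∈ (cs.take m).drop p, get_type c = t) ∧
      (∀ c, (cs.take p).getLast? = some c → get_type c ≠ t) ∧
      (PySem.List.pyRange 1 (m : Int) 1).foldl (pyStepA cs)
          (init, 3002, 3100, 3200, get_type ((PySem.List.pyGet? cs 0).getD ' '), 0)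
        = (init ++ E (runsOf (cs.take p)) 3002 3100 3200,
           3002 + ((runsOf (cs.take p)).length : Int),
           3100 + (nLet (runsOf (cs.take p)) : Int),
           3200 + (nDig (runsOf (cs.take p)) : Int), t, (p : Int)) := by
  induction m, h1 using Nat.le_induction with
  | base =>
    intro h2
    have h0 : 0 < cs.length := lt_of_lt_of_le h2 hn
    have hget : PySem.List.pyGet? cs (0 : Int) = some cs[0] := by
      rw [show (0 : Int) = ((0 : Nat) : Int) by rfl, PySem.List.pyGet?_natCast cs 0,
        List.getElem?_eq_getElem h0]
    have htake1 : cs.take 1 = [cs[0]] := by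
      cases cs with
      | nil => simp at h0
      | cons a l => simp
    refine ⟨0, get_type cs[0], by omega, ?_, ?_, ?_, ?_⟩
    · rw [List.drop_zero, htake1]; simp
    · intro c hc
      rw [List.drop_zero, htake1] at hc
      rw [List.mem_singleton.mp hc]
    · simp
    · rw [PySem.List.pyRange_one_eq_nil (by norm_num)]
      simp [hget, runsOf, E, nLet, nDig]
  | succ m h1 ih =>
    intro h2
    obtain ⟨p, t, hp, hne, hall, hb, hfold⟩ := ih (by omega)
    have hmlen : m < cs.length := by omega
    have hget : PySem.List.pyGet? cs (m : Int) = some cs[m] := by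
      rw [PySem.List.pyGet?_natCast cs m, List.getElem?_eq_getElem hmlen]
    have htake : cs.take (m + 1) = cs.take m ++ [cs[m]] := by
      exact List.take_succ_eq_append_getElem hmlen
    have hlen_take : (cs.take m).length = m := by simp; omega
    have hrange : PySem.List.pyRange 1 ((m + 1 : Nat) : Int) 1
        = PySem.List.pyRange 1 (m : Int) 1 ++ [(m : Int)] := by
      push_cast
      exact PySem.List.pyRange_one_succ_right (by exact_mod_cast h1)
    rw [hrange, List.foldl_append, hfold]
    simp only [List.foldl_cons, List.foldl_nil]
    by_cases hc : get_type cs[m] = t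
    · -- same type: state unchanged, run extends
      have hstep : pyStepA cs (init ++ E (runsOf (cs.take p)) 3002 3100 3200,
           3002 + ((runsOf (cs.take p)).length : Int),
           3100 + (nLet (runsOf (cs.take p)) : Int),
           3200 + (nDig (runsOf (cs.take p)) : Int), t, (p : Int)) (m : Int)
          = (init ++ E (runsOf (cs.take p)) 3002 3100 3200,
           3002 + ((runsOf (cs.take p)).length : Int),
           3100 + (nLet (runsOf (cs.take p)) : Int),
           3200 + (nDig (runsOf (cs.take p)) : Int), t, (p : Int)) := by
        simp [pyStepA, hget, hc]
      rw [hstep]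
      have hdrop : (cs.take (m + 1)).drop p = (cs.take m).drop p ++ [cs[m]] := by
        rw [htake, List.drop_append_of_le_length (by omega)]
      refine ⟨p, t, by omega, ?_, ?_, hb, rfl⟩
      · simp [hdrop]
      · intro c hcc
        rw [hdrop] at hcc
        rcases List.mem_append.mp hcc with h | h
        · exact hall c h
        · simp at h; simp [h, hc]
    · -- type changes: run [p, m) is emitted
      have hdecomp : cs.take p ++ (cs.take m).drop p = cs.take m := by
        conv_rhs => rw [← List.take_append_drop p (cs.take m)]
        rw [List.take_take, min_eq_left (by omega)]
      have hruns : runsOf (cs.take m) = runsOf (cs.take p) ++ [((cs.take m).drop p, t)] := by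
        conv_lhs => rw [← hdecomp]
        exact runsOf_append_last t _ _ hne hall hb
      have hseg : PySem.List.slice cs (some (p : Int)) (some (m : Int)) = (cs.take m).drop p := by
        rw [PySem.List.slice_natCast, List.drop_take]
      have hdrop1 : (cs.take (m + 1)).drop m = [cs[m]] := by
        rw [htake, List.drop_append_of_le_length (by omega),
          List.drop_eq_nil_of_le (by omega), List.nil_append]
      have hblast : ∀ c, (cs.take m).getLast? = some c → get_type c ≠ get_type cs[m] := by
        intro c hcc
        rw [← hdecomp, List.getLast?_append_of_ne_nil _ hne] at hcc
        have : c ∈ (cs.take m).drop p := List.mem_of_getLast? hcc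
        rw [hall c this]
        exact fun h => hc h.symm
      refine ⟨m, get_type cs[m], by omega, by simp [hdrop1], ?_, hblast, ?_⟩
      · intro c hcc
        rw [hdrop1] at hcc
        simp at hcc
        simp [hcc]
      · -- the emitted state equals the invariant state for p' = m
        rw [hruns, E_append]
        cases t <;>
          simp [pyStepA, hget, hseg, Ne.symm hc, E, nLet, nDig, List.countP_append,
            List.append_assoc] <;>
          ring_nf <;> try simp

theorem runsOf_ne_nil (l : List Char) (h : l ≠ []) : runsOf l ≠ [] := by
  cases l with
  | nil => exact absurd rfl h
  | cons c rest => rw [runsOf]; simp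

theorem mid_eq (cs : List Char) (init : List (String × Int)) (n : Nat) (hn : n ≤ cs.length)
    (st : List (String × Int) × Int × Int × Int × TType × Int)
    (hst : st = (PySem.List.pyRange 1 (n : Int) 1).foldl (pyStepA cs)
        (init, 3002, 3100, 3200, get_type ((PySem.List.pyGet? cs 0).getD ' '), 0)) :
    (if st.2.2.2.2.2 ≠ 0 then
       if st.2.2.2.2.1 = TType.digit then
         st.1 ++ [(String.ofList (PySem.List.slice cs (some st.2.2.2.2.2) (some (n : Int))), st.2.1),
                  (String.ofList (PySem.List.slice cs (some st.2.2.2.2.2) (some (n : Int))), st.2.2.2.1)]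
       else if st.2.2.2.2.1 = TType.letter then
         st.1 ++ [(String.ofList (PySem.List.slice cs (some st.2.2.2.2.2) (some (n : Int))), st.2.1),
                  (String.ofList (PySem.List.slice cs (some st.2.2.2.2.2) (some (n : Int))), st.2.2.1)]
       else st.1 ++ [(String.ofList (PySem.List.slice cs (some st.2.2.2.2.2) (some (n : Int))), st.2.1)]
     else st.1)
    = (if 2 ≤ (runsOf (cs.take n)).length then
        ((runsOf (cs.take n)).foldl emitStep (init, 3002, 3100, 3200)).1 else init) := by
  subst hst
  rcases Nat.eq_zero_or_pos n with rfl | hpos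
  · rw [show ((0 : Nat) : Int) = 0 by rfl, PySem.List.pyRange_one_eq_nil (by norm_num)]
    simp [runsOf]
  · obtain ⟨p, t, hp, hne, hall, hb, hfold⟩ := loop_inv cs init n hn n hpos le_rfl
    rw [hfold]
    have hdecomp : cs.take p ++ (cs.take n).drop p = cs.take n := by
      conv_rhs => rw [← List.take_append_drop p (cs.take n)]
      rw [List.take_take, min_eq_left (by omega)]
    have hruns : runsOf (cs.take n) = runsOf (cs.take p) ++ [((cs.take n).drop p, t)] := by
      conv_lhs => rw [← hdecomp]
      exact runsOf_append_last t _ _ hne hall hb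
    rcases Nat.eq_zero_or_pos p with rfl | hppos
    · -- single run: A emits no tail tokens, B's length-≥-2 guard fails
      have h1 : runsOf (cs.take n) = [((cs.take n).drop 0, t)] := by
        simpa [runsOf] using hruns
      simp [h1, runsOf, List.drop_zero, E]
    · -- at least two runs: A's loop + tail emission = B's per-run emission
      have htp : cs.take p ≠ [] := by
        have : (cs.take p).length = p := by simp; omega
        intro h0; rw [h0] at this; simp at this; omega
      have hr0 : runsOf (cs.take p) ≠ [] := runsOf_ne_nil _ htp
      have hseg : PySem.List.slice cs (some (p : Int)) (some (n : Int)) = (cs.take n).drop p := by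
        rw [PySem.List.slice_natCast, List.drop_take]
      have hguard : 2 ≤ (runsOf (cs.take n)).length := by
        rw [hruns]; simp
        exact Nat.one_le_iff_ne_zero.mpr (by simpa [List.length_eq_zero_iff] using hr0)
      rw [if_pos hguard, foldl_emitStep]
      rw [hruns, E_append]
      have hp0 : ¬ p = 0 := by omega
      cases t <;>
        simp [hp0, hseg, E, List.append_assoc]

theorem email_transform_eq_alt (email : String) :
    email_transform email = email_transform_alt email := by
  unfold email_transform email_transform_alt
  by_cases hfind : PySem.Chars.find email.toList ['@'] = -1
  · simp [hfind]
  · have hge : 0 ≤ PySem.Chars.find email.toList ['@'] := by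
      have := PySem.Chars.neg_one_le_find email.toList ['@']
      omega
    obtain ⟨n, hfn⟩ : ∃ n : Nat, PySem.Chars.find email.toList ['@'] = (n : Int) :=
      ⟨_, (Int.toNat_of_nonneg hge).symm⟩
    have hnlt : n < email.toList.length := by
      have hp := (PySem.Chars.find_spec hge).1
      rw [hfn, Int.toNat_natCast] at hp
      have := hp.length_le
      simp only [List.length_cons, List.length_nil, List.length_drop] at this
      omega
    have hne1 : ¬((n : Int) = -1) := by omega
    simp only [hfn, if_neg hne1]
    have hloc : PySem.List.slice email.toList none (some (n : Int)) = email.toList.take n :=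
      PySem.List.slice_to_natCast email.toList n
    have hcast : ((n : Int) + 1) = ((n + 1 : Nat) : Int) := by push_cast; ring
    simp only [PySem.List.slice_zero_start, hloc, hcast, PySem.List.slice_from_natCast]
    rw [mid_eq email.toList _ n (le_of_lt hnlt) _ rfl]
    by_cases hq : PySem.Chars.find (email.toList.drop (n + 1)) ['.'] = -1
    · simp [hq]
    · have hqge : 0 ≤ PySem.Chars.find (email.toList.drop (n + 1)) ['.'] := by
        have := PySem.Chars.neg_one_le_find (email.toList.drop (n + 1)) ['.']
        omega
      obtain ⟨q, hq2⟩ : ∃ q : Nat, PySem.Chars.find (email.toList.drop (n + 1)) ['.'] = (q : Int) :=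
        ⟨_, (Int.toNat_of_nonneg hqge).symm⟩
      have hq1 : ¬((q : Int) = -1) := by omega
      simp only [hq2, if_neg hq1, PySem.List.slice_natCast_add, PySem.List.slice_to_natCast]

-- ===== VERDICT (by name: the statement is the Claim_ definition above) =====
theorem email_transform_spec : Claim_equal_email_transform := by
  intro email _
  exact email_transform_eq_alt email
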